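-- pv_equiv track=rewrite | github.com/nii8/split_video | mini/sp_video/make_time/interval.py | group_consecutive_ids
-- ===== SOURCE A (Python) =====
-- def group_consecutive_ids(id_list):
--     """
--     将连续 ID 分组，保持原始顺序。
--     例：[3,1,2,7] → [[3],[1,2],[7]]
--     """
--     if not id_list:
--         return []
--     result  = []
--     current = [id_list[0]]
--     for i in range(1, len(id_list)):
--         if id_list[i] == id_list[i - 1] + 1:
--             current.append(id_list[i])
--         else:
--             result.append(current)
--             current = [id_list[i]]
--     result.append(current)
--     return result
-- ===== SOURCE B (Python) =====
-- def group_consecutive_ids(id_list):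
--     """
--     将连续 ID 分组，保持原始顺序。
--     例：[3,1,2,7] → [[3],[1,2],[7]]
--     """
--     # key v - i is invariant exactly across a consecutive +1 run
--     keyed = [(v - i, v) for i, v in enumerate(id_list)]
--     groups = []
--     j = 0
--     n = len(keyed)
--     while j < n:
--         k = keyed[j][0]
--         run = []
--         while j < n and keyed[j][0] == k:
--             run.append(keyed[j][1])
--             j += 1
--         groups.append(run)
--     return groups
-- ===== Notes on version B (the rewrite author's own statement) =====
-- stated objective: alternative
-- what changed: B first maps each element to a derived key (value minus index), which is constant exactly across a consecutive +1 run, and then splits the keyed list into maximal equal-key runs, instead of maintaining a running buffer while comparing each element with its predecessor.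
import Mathlib
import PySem

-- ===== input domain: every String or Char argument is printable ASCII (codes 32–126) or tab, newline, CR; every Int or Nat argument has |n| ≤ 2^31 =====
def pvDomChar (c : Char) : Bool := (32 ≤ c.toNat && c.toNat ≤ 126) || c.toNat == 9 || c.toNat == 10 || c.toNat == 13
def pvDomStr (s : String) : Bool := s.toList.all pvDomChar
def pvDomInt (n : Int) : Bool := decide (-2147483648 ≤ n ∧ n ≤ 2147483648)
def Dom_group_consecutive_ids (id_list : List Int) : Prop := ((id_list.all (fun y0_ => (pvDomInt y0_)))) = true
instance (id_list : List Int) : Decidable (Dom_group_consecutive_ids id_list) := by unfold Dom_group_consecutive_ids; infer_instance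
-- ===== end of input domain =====

-- A keeps a running buffer and compares each element with its predecessor; B instead keys
-- each element by (value - index) — constant exactly across a consecutive +1 run — and splits
-- the keyed list into maximal equal-key runs (alternative decomposition, same O(n) cost).

-- ===== PORT A =====
def group_consecutive_ids (id_list : List Int) : List (List Int) :=
  if id_list = [] then []
  else
    let st := (PySem.List.pyRange 1 (PySem.List.len id_list) 1).foldl
      (fun (st : List (List Int) × List Int) i =>
        if PySem.List.pyGetD id_list i 0 = PySem.List.pyGetD id_list (i - 1) 0 + 1 then
          (st.1, st.2 ++ [PySem.List.pyGetD id_list i 0])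
        else
          (st.1 ++ [st.2], [PySem.List.pyGetD id_list i 0]))
      ([], [PySem.List.pyGetD id_list 0 0])
    st.1 ++ [st.2]

-- ===== PORT B =====
-- the inner while loop collecting one equal-key run is takeWhile/dropWhile on the keyed list
def pvChunks : List (Int × Int) → List (List Int)
  | [] => []
  | (k, v) :: rest =>
      (v :: (rest.takeWhile (fun p => p.1 == k)).map (fun p => p.2)) ::
      pvChunks (rest.dropWhile (fun p => p.1 == k))
termination_by l => l.length
decreasing_by
  simp
  exact List.length_dropWhile_le _ _

def group_consecutive_ids_alt (id_list : List Int) : List (List Int) :=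
  pvChunks ((PySem.List.enumerate id_list 0).map (fun p => (p.2 - p.1, p.2)))

-- ===== PRECONDITION & SPEC =====
def Spec_group_consecutive_ids (id_list : List Int) (out : List (List Int)) : Prop := out = group_consecutive_ids_alt id_list
instance (id_list : List Int) (out : List (List Int)) : Decidable (Spec_group_consecutive_ids id_list out) := by unfold Spec_group_consecutive_ids; infer_instance

-- ===== CLAIM (what is proved, stated in full; the proofs are below) =====
def Claim_equal_group_consecutive_ids : Prop := ∀ (id_list : List Int), Dom_group_consecutive_ids id_list → Spec_group_consecutive_ids id_list (group_consecutive_ids id_list)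

-- ===== LEMMAS AND PROOFS =====

-- clean recursive reading of A's loop state (proof helper)
def goA (res : List (List Int)) (cur : List Int) (prev : Int) : List Int → List (List Int)
  | [] => res ++ [cur]
  | y :: t => if y = prev + 1 then goA res (cur ++ [y]) y t else goA (res ++ [cur]) [y] y t

-- the keyed list of B, starting at index s (proof helper)
def keyedFrom (s : Int) (xs : List Int) : List (Int × Int) :=
  (PySem.List.enumerate xs s).map (fun p => (p.2 - p.1, p.2))

-- prepend cur to the first chunk (proof helper)
def prep (cur : List Int) : List (List Int) → List (List Int)
  | [] => [cur]
  | g :: gs => (cur ++ g) :: gs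

lemma keyedFrom_nil (s : Int) : keyedFrom s [] = [] := rfl

lemma pvChunks_nil : pvChunks [] = [] := by simp [pvChunks]

lemma keyedFrom_cons (s : Int) (v : Int) (t : List Int) :
    keyedFrom s (v :: t) = (v - s, v) :: keyedFrom (s + 1) t := by
  simp [keyedFrom, PySem.List.enumerate_cons]

lemma prep_prep (c d : List Int) (X : List (List Int)) :
    prep c (prep d X) = prep (c ++ d) X := by
  cases X <;> simp [prep]

lemma pvChunks_cons (k v : Int) (l : List (Int × Int)) :
    pvChunks ((k, v) :: l) =
      (v :: (l.takeWhile (fun p => p.1 == k)).map (fun p => p.2)) ::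
      pvChunks (l.dropWhile (fun p => p.1 == k)) := by
  simp [pvChunks]

lemma prep_nil_pvChunks_cons (k v : Int) (l : List (Int × Int)) :
    prep [] (pvChunks ((k, v) :: l)) = pvChunks ((k, v) :: l) := by
  rw [pvChunks_cons]; simp [prep]

lemma pvChunks_cons_same (k prev v : Int) (l : List (Int × Int)) :
    pvChunks ((k, prev) :: (k, v) :: l) = prep [prev] (pvChunks ((k, v) :: l)) := by
  rw [pvChunks_cons, pvChunks_cons]
  simp [List.takeWhile, List.dropWhile, prep]

lemma pvChunks_cons_ne (k k' prev v : Int) (hk : k' ≠ k) (l : List (Int × Int)) :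
    pvChunks ((k, prev) :: (k', v) :: l) = [prev] :: pvChunks ((k', v) :: l) := by
  have hb : (k' == k) = false := by simpa using hk
  rw [pvChunks_cons]
  simp [List.takeWhile, List.dropWhile, hb]

-- B side: goA equals pvChunks on the keyed tail, with cur ++ [prev] pending
lemma goA_eq_chunks (t : List Int) : ∀ (s prev : Int) (cur : List Int) (res : List (List Int)),
    goA res (cur ++ [prev]) prev t =
      res ++ prep cur (pvChunks ((prev - s, prev) :: keyedFrom (s + 1) t)) := by
  induction t with
  | nil =>
    intro s prev cur res
    rw [keyedFrom_nil, pvChunks_cons]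
    simp [goA, prep, pvChunks_nil]
  | cons y t ih =>
    intro s prev cur res
    rw [keyedFrom_cons]
    by_cases hy : y = prev + 1
    · have hkey : y - (s + 1) = prev - s := by omega
      rw [hkey, pvChunks_cons_same, prep_prep]
      simp only [goA, hy]

      have := ih (s + 1) y (cur ++ [prev]) res
      rw [List.append_assoc] at this ⊢
      simpa [hy] using this
    · have hkey : y - (s + 1) ≠ prev - s := by omega
      rw [pvChunks_cons_ne _ _ _ _ hkey]
      have h2 := ih (s + 1) y [] (res ++ [cur ++ [prev]])
      simp only [List.nil_append] at h2
      rw [prep_nil_pvChunks_cons] at h2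
      simp only [goA, if_neg hy]
      rw [h2]
      simp [prep]

-- A side: the index fold is goA
lemma foldA_eq_goA (xs : List Int) : ∀ (n a : Nat), 1 ≤ a → a ≤ xs.length → n = xs.length - a →
    ∀ (res : List (List Int)) (cur : List Int),
    (let st := (PySem.List.pyRange (a : Int) (PySem.List.len xs) 1).foldl
      (fun (st : List (List Int) × List Int) i =>
        if PySem.List.pyGetD xs i 0 = PySem.List.pyGetD xs (i - 1) 0 + 1 then
          (st.1, st.2 ++ [PySem.List.pyGetD xs i 0])
        else
          (st.1 ++ [st.2], [PySem.List.pyGetD xs i 0]))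
      (res, cur)
     st.1 ++ [st.2]) = goA res cur (xs.getD (a - 1) 0) (xs.drop a) := by
  intro n
  induction n with
  | zero =>
    intro a ha1 hale hn res cur
    have ha : a = xs.length := by omega
    have hnil : PySem.List.pyRange (a : Int) (PySem.List.len xs) 1 = [] := by
      apply PySem.List.pyRange_one_eq_nil
      simp [PySem.List.len_eq, ha]
    rw [hnil]
    simp [goA, List.drop_eq_nil_of_le (by omega : xs.length ≤ a)]
  | succ m ih =>
    intro a ha1 hale hn res cur
    have halt : a < xs.length := by omega
    have hcons : PySem.List.pyRange (a : Int) (PySem.List.len xs) 1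
        = (a : Int) :: PySem.List.pyRange ((a : Int) + 1) (PySem.List.len xs) 1 := by
      apply PySem.List.pyRange_one_cons
      simp [PySem.List.len_eq]; exact_mod_cast halt
    have hga : PySem.List.pyGetD xs (a : Int) 0 = xs.getD a 0 := by
      simp [PySem.List.pyGetD_natCast]
    have hgprev : PySem.List.pyGetD xs ((a : Int) - 1) 0 = xs.getD (a - 1) 0 := by
      have : ((a : Int) - 1) = ((a - 1 : Nat) : Int) := by omega
      rw [this]; simp [PySem.List.pyGetD_natCast]
    have hdrop : xs.drop a = xs.getD a 0 :: xs.drop (a + 1) := by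
      rw [List.drop_eq_getElem_cons halt, List.getD_eq_getElem xs 0 halt]
    have hcast : ((a : Int) + 1) = ((a + 1 : Nat) : Int) := by push_cast; ring
    rw [hcons]
    simp only [List.foldl_cons, hga, hgprev]
    rw [hdrop]
    simp only [goA]
    rcases eq_or_ne (xs.getD a 0) (xs.getD (a - 1) 0 + 1) with hc | hc
    · rw [if_pos hc, if_pos hc, hcast]
      have h2 := ih (a + 1) (by omega) (by omega) (by omega) res (cur ++ [xs.getD a 0])
      simp only [Nat.add_sub_cancel] at h2
      exact h2
    · rw [if_neg hc, if_neg hc, hcast]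
      have h2 := ih (a + 1) (by omega) (by omega) (by omega) (res ++ [cur]) [xs.getD a 0]
      simp only [Nat.add_sub_cancel] at h2
      exact h2

lemma portA_cons (x : Int) (t : List Int) :
    group_consecutive_ids (x :: t) = goA [] [x] x t := by
  unfold group_consecutive_ids
  rw [if_neg (by simp)]
  have h := foldA_eq_goA (x :: t) t.length 1 (le_refl 1) (by simp) (by simp) [] [x]
  simp only [Nat.cast_one] at h
  have h0 : PySem.List.pyGetD (x :: t) 0 0 = x := by
    simp [PySem.List.pyGetD]
  simp only [h0] at h ⊢
  rw [h]
  simp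

-- ===== VERDICT (by name: the statement is the Claim_ definition above) =====
theorem group_consecutive_ids_spec : Claim_equal_group_consecutive_ids := by
  intro id_list _
  unfold Spec_group_consecutive_ids
  cases id_list with
  | nil =>
    simp [group_consecutive_ids, group_consecutive_ids_alt, pvChunks_nil]
  | cons x t =>
    rw [portA_cons]
    have hB : group_consecutive_ids_alt (x :: t) = pvChunks ((x - 0, x) :: keyedFrom 1 t) := by
      unfold group_consecutive_ids_alt
      rw [show (PySem.List.enumerate (x :: t) 0).map (fun p => (p.2 - p.1, p.2))
            = keyedFrom 0 (x :: t) from rfl, keyedFrom_cons]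
      norm_num
    rw [hB]
    have := goA_eq_chunks t 0 x [] []
    simp only [List.nil_append] at this
    rw [this, prep_nil_pvChunks_cons]
    norm_num
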